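-- pv_equiv track=rewrite | github.com/mshafqats/HackerEarth | Math/Combinatorics/Basics of Combinatorics/Intersection of intervals.py | calculate_ans
-- ===== SOURCE A (Python) =====
-- def calculate_ans(n, s):
--     f = [0] * (2 * n + 5)
--     f[1] = 1
--     mod = 10 ** 9 + 7
--
--     for i in range(3, n + n + 1):
--         f[i] = f[i - 2] * i % mod
--
--     ans = 0
--     for i in range(2, n + n + 1):
--         cnt = f[n + n - 1]
--         cnt = (cnt + mod - (f[i - 2] * f[n + n - i] % mod)) % mod
--         ans = (ans + cnt * (s[i - 1] - s[i - 2])) % mod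
--
--     return ans
-- ===== SOURCE B (Python) =====
-- def calculate_ans(n, s):
--     # Parity observation: A's padded table f is zero at every even index, so only the
--     # odd loop indices i = 2k+1 contribute a nonzero product f[i-2]*f[2n-i].  B therefore
--     # works with a compact table g[k] = (2k-1)!! mod p of length n+1 (half of A's),
--     # telescopes the f[2n-1]-weighted differences into one closed-form term, and
--     # subtracts a convolution sum g[k]*g[n-k] over the n-1 interior points only.
--     mod = 10 ** 9 + 7
--     if n < 1:
--         return 0
--     g = [1] * (n + 1)
--     for k in range(2, n + 1):
--         g[k] = g[k - 1] * (2 * k - 1) % mod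
--     total = g[n] * ((s[2 * n - 1] - s[0]) % mod) % mod
--     for k in range(1, n):
--         total = (total - g[k] * g[n - k] % mod * (s[2 * k] - s[2 * k - 1])) % mod
--     return total
-- ===== Notes on version B (the rewrite author's own statement) =====
-- stated objective: alternative
-- what changed: B drops A's padded table (zero at every even index) for a compact double-factorial table g[k]=(2k-1)!! of half the length, telescopes the constant-weighted differences into one closed-form term, and subtracts a convolution g[k]*g[n-k] over only the n-1 interior points instead of A's 2n-1-iteration per-term cnt loop.
import Mathlib
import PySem

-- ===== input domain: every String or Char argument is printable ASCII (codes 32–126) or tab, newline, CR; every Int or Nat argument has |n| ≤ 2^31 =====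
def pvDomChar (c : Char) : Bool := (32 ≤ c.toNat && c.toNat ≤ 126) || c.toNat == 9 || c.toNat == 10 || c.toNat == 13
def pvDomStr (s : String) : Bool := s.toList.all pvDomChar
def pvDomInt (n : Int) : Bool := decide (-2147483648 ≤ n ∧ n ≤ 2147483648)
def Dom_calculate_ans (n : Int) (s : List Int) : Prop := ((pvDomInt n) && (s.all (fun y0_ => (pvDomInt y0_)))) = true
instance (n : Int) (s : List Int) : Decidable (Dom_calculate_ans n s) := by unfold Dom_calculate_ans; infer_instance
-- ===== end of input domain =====

-- B replaces A's padded table (zero at every even index) by a compact double-factorial table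
-- g[k] = (2k-1)!! of half the length, telescopes the constant-weighted differences into one
-- closed-form term, and subtracts a convolution g[k]*g[n-k] over the n-1 interior points only;
-- objective: alternative decomposition.

def pvMod : Int := 1000000007

-- ===== PORT A =====
-- helper: A's double-factorial table f, built exactly as A's first loop does
def pvBuildF (n : Int) : List Int :=
  let f0 := (List.replicate (2 * n + 5).toNat 0).set 1 1
  (PySem.List.pyRange 3 (2 * n + 1) 1).foldl
    (fun f i => f.set i.toNat (PySem.Int.mod (f.getD (i - 2).toNat 0 * i) pvMod)) f0

def calculate_ans (n : Int) (s : List Int) : Int :=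
  let f := pvBuildF n
  (PySem.List.pyRange 2 (2 * n + 1) 1).foldl
    (fun ans i =>
      let cnt := f.getD (2 * n - 1).toNat 0
      let cnt2 := PySem.Int.mod
        (cnt + pvMod - PySem.Int.mod (f.getD (i - 2).toNat 0 * f.getD (2 * n - i).toNat 0) pvMod)
        pvMod
      PySem.Int.mod (ans + cnt2 * (s.getD (i - 1).toNat 0 - s.getD (i - 2).toNat 0)) pvMod)
    0

-- ===== PORT B =====
def calculate_ans_alt (n : Int) (s : List Int) : Int :=
  if n < 1 then 0
  else
    let g := (PySem.List.pyRange 2 (n + 1) 1).foldl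
      (fun g k => g.set k.toNat (PySem.Int.mod (g.getD (k - 1).toNat 0 * (2 * k - 1)) pvMod))
      (List.replicate (n + 1).toNat 1)
    let total0 := PySem.Int.mod
      (g.getD n.toNat 0 * PySem.Int.mod (s.getD (2 * n - 1).toNat 0 - s.getD 0 0) pvMod) pvMod
    (PySem.List.pyRange 1 n 1).foldl
      (fun total k => PySem.Int.mod
        (total - PySem.Int.mod (g.getD k.toNat 0 * g.getD (n - k).toNat 0) pvMod *
          (s.getD (2 * k).toNat 0 - s.getD (2 * k - 1).toNat 0)) pvMod)
      total0

-- ===== PRECONDITION & SPEC =====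
-- Pre_ excludes exactly A's IndexError inputs: n ≤ -2 (f too short for f[1] = 1) and
-- n ≥ 1 with len(s) < 2n (the s[i-1] reads run past s).
def Pre_calculate_ans (n : Int) (s : List Int) : Prop :=
  -1 ≤ n ∧ (1 ≤ n → 2 * n ≤ (s.length : Int))
instance (n : Int) (s : List Int) : Decidable (Pre_calculate_ans n s) := by
  unfold Pre_calculate_ans; infer_instance

def pvWitness_calculate_ans : Int × List Int := (2, [1, 3, 5, 7])

def Spec_calculate_ans (n : Int) (s : List Int) (out : Int) : Prop := out = calculate_ans_alt n s
instance (n : Int) (s : List Int) (out : Int) : Decidable (Spec_calculate_ans n s out) := by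
  unfold Spec_calculate_ans; infer_instance

-- ===== CLAIM (what is proved, stated in full; the proofs are below) =====
def Claim_equal_calculate_ans : Prop := ∀ (n : Int) (s : List Int), Dom_calculate_ans n s → Pre_calculate_ans n s → Spec_calculate_ans n s (calculate_ans n s)

-- ===== LEMMAS AND PROOFS =====

theorem pvMod_pos : (0:Int) < pvMod := by unfold pvMod; norm_num

-- (2j-1)!! reduced step by step mod pvMod, at the odd naturals; 1 below index 3
def ddf : Nat → Int
  | 0 => 1
  | 1 => 1
  | 2 => 1
  | (j+3) => PySem.Int.mod (ddf (j+1) * ((j:Int)+3)) pvMod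

theorem ddf_step (j : Nat) : ddf (j+3) = PySem.Int.mod (ddf (j+1) * ((j:Int)+3)) pvMod := rfl

-- a mod-accumulating foldl with a reduced seed is one big sum reduced mod pvMod
theorem pv_fold_mod (t : Int → Int) :
    ∀ (L : List Int) (a : Int), a % pvMod = a →
      L.foldl (fun x i => PySem.Int.mod (x + t i) pvMod) a = (a + (L.map t).sum) % pvMod := by
  intro L
  induction L with
  | nil => intro a h; simpa using h.symm
  | cons x xs ih =>
    intro a _
    have hred : PySem.Int.mod (a + t x) pvMod % pvMod = PySem.Int.mod (a + t x) pvMod := by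
      rw [PySem.Int.mod_eq_emod_of_pos pvMod_pos]
      exact Int.emod_emod_of_dvd _ dvd_rfl
    have := ih (PySem.Int.mod (a + t x) pvMod) hred
    simp only [List.foldl_cons, this, List.map_cons, List.sum_cons]
    rw [PySem.Int.mod_eq_emod_of_pos pvMod_pos]
    have hm : pvMod = 1000000007 := rfl
    rw [hm]
    omega

-- telescoping: the interval differences over a contiguous range collapse
theorem pv_telescope (h : Int → Int) :
    ∀ (k : Nat) (a : Int),
      ((PySem.List.pyRange a (a + ((k : Int) + 1)) 1).map (fun i => h i - h (i - 1))).sum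
        = h (a + (k : Int)) - h (a - 1) := by
  intro k
  induction k with
  | zero =>
    intro a
    simp only [Nat.cast_zero, zero_add, add_zero]
    rw [PySem.List.pyRange_one_singleton]
    simp
  | succ k ih =>
    intro a
    have hsplit : PySem.List.pyRange a (a + (((k : Int) + 1) + 1)) 1
        = PySem.List.pyRange a (a + ((k : Int) + 1)) 1 ++ [a + ((k : Int) + 1)] := by
      have := PySem.List.pyRange_one_succ_right (a := a) (b := a + ((k : Int) + 1))
        (by omega)
      have harg : a + (((k : Int) + 1) + 1) = (a + ((k : Int) + 1)) + 1 := by ring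
      rw [harg, this]
    push_cast at hsplit ih ⊢
    rw [hsplit, List.map_append, List.sum_append, ih a]
    have : a + (k + 1) - 1 = a + (k:Int) := by ring
    simp only [List.map_cons, List.map_nil, List.sum_cons, List.sum_nil, this]
    ring

-- per-term congruence plus summing: A's cnt-sum ≡ F·Σd − Σ(p%m)·d  (mod pvMod)
theorem pv_combo (F : Int) (p d : Int → Int) :
    ∀ L : List Int,
      ((L.map (fun i => (PySem.Int.mod (F + pvMod - PySem.Int.mod (p i) pvMod) pvMod) * d i)).sum) % pvMod
        = (F * (L.map d).sum - (L.map (fun i => (PySem.Int.mod (p i) pvMod) * d i)).sum) % pvMod := by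
  have key : ∀ x : Int,
      Int.ModEq pvMod ((PySem.Int.mod (F + pvMod - PySem.Int.mod (p x) pvMod) pvMod) * d x)
        (F * d x - (PySem.Int.mod (p x) pvMod) * d x) := by
    intro x
    rw [PySem.Int.mod_eq_emod_of_pos pvMod_pos]
    have h1 : Int.ModEq pvMod ((F + pvMod - PySem.Int.mod (p x) pvMod) % pvMod)
        (F - PySem.Int.mod (p x) pvMod) := by
      have h2 : Int.ModEq pvMod ((F + pvMod - PySem.Int.mod (p x) pvMod) % pvMod)
          (F + pvMod - PySem.Int.mod (p x) pvMod) :=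
        Int.emod_emod_of_dvd _ dvd_rfl
      have h3 : Int.ModEq pvMod (F + pvMod - PySem.Int.mod (p x) pvMod)
          (F - PySem.Int.mod (p x) pvMod) := by
        apply Int.ModEq.symm
        rw [Int.modEq_iff_dvd]
        exact ⟨1, by ring⟩
      exact h2.trans h3
    have := h1.mul (Int.ModEq.refl (d x))
    calc ((F + pvMod - PySem.Int.mod (p x) pvMod) % pvMod) * d x
        ≡ (F - PySem.Int.mod (p x) pvMod) * d x [ZMOD pvMod] := this
      _ = F * d x - (PySem.Int.mod (p x) pvMod) * d x := by ring
  intro L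
  induction L with
  | nil => simp
  | cons x xs ih =>
    simp only [List.map_cons, List.sum_cons]
    have hadd := (key x).add (show Int.ModEq pvMod _ _ from ih)
    have hr : F * (d x + (xs.map d).sum)
        - ((PySem.Int.mod (p x) pvMod) * d x + (xs.map (fun i => (PySem.Int.mod (p i) pvMod) * d i)).sum)
        = (F * d x - (PySem.Int.mod (p x) pvMod) * d x)
          + (F * (xs.map d).sum - (xs.map (fun i => (PySem.Int.mod (p i) pvMod) * d i)).sum) := by ring
    rw [hr]
    exact hadd

-- the closing emod algebra
theorem pv_final2 (F G S : Int) :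
    ((F * (G % pvMod)) % pvMod - S) % pvMod = (F * G - S) % pvMod := by
  conv_lhs => rw [Int.sub_emod, Int.emod_emod_of_dvd _ dvd_rfl]
  conv_rhs => rw [Int.sub_emod]
  congr 2
  rw [Int.mul_emod, Int.mul_emod F G, Int.emod_emod_of_dvd _ dvd_rfl]

-- getD facts
theorem pv_getD_replicate (m j : Nat) (v : Int) :
    (List.replicate m v).getD j 0 = if j < m then v else 0 := by
  by_cases h : j < m
  · simp [List.getD, h]
  · simp [List.getD, h]

theorem pv_getD_set_self (l : List Int) (i : Nat) (a : Int) (hi : i < l.length) :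
    (l.set i a).getD i 0 = a := by
  simp [List.getD, hi]

theorem pv_getD_set_ne (l : List Int) (i j : Nat) (a : Int) (h : i ≠ j) :
    (l.set i a).getD j 0 = l.getD j 0 := by
  simp [List.getD, List.getElem?_set_ne h]

theorem pv_mod_zero : PySem.Int.mod 0 pvMod = 0 := by
  rw [PySem.Int.mod_eq_emod_of_pos pvMod_pos]; simp

theorem pv_mod_idem (x : Int) : PySem.Int.mod x pvMod % pvMod = PySem.Int.mod x pvMod := by
  rw [PySem.Int.mod_eq_emod_of_pos pvMod_pos]
  exact Int.emod_emod_of_dvd _ dvd_rfl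

theorem pv_sum_neg (u : Int → Int) :
    ∀ L : List Int, (L.map (fun k => -(u k))).sum = -((L.map u).sum) := by
  intro L
  induction L with
  | nil => simp
  | cons x xs ih => simp [ih]; ring

-- A's first loop builds exactly the odd double factorials (even slots stay zero)
theorem pv_len_fold (v : List Int → Int → Int) :
    ∀ (is : List Int) (g : List Int),
      (is.foldl (fun g kk => g.set kk.toNat (v g kk)) g).length = g.length := by
  intro is
  induction is with
  | nil => intro g; rfl
  | cons x xs ih => intro g; rw [List.foldl_cons, ih, List.length_set]

theorem pv_tableA (n : Int) (hn : 1 ≤ n) :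
    ∀ (k : Nat), 3 + (k:Int) ≤ 2*n + 1 →
      ((PySem.List.pyRange 3 (3 + (k:Int)) 1).foldl
          (fun f i => f.set i.toNat (PySem.Int.mod (f.getD (i - 2).toNat 0 * i) pvMod))
          ((List.replicate (2 * n + 5).toNat 0).set 1 1)).length = (2*n+5).toNat ∧
      ∀ j : Nat,
        ((PySem.List.pyRange 3 (3 + (k:Int)) 1).foldl
          (fun f i => f.set i.toNat (PySem.Int.mod (f.getD (i - 2).toNat 0 * i) pvMod))
          ((List.replicate (2 * n + 5).toNat 0).set 1 1)).getD j 0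
          = if j % 2 = 1 ∧ (j:Int) < 3 + (k:Int) then ddf j else 0 := by
  intro k
  induction k with
  | zero =>
    intro _
    rw [show (3:Int) + ((0:Nat):Int) = 3 by norm_num, PySem.List.pyRange_one_eq_nil (le_refl 3)]
    simp only [List.foldl_nil]
    refine ⟨by simp, ?_⟩
    intro j
    by_cases hj : j = 1
    · subst hj
      rw [pv_getD_set_self _ _ _ (by simp; omega)]
      norm_num [ddf]
    · rw [pv_getD_set_ne _ _ _ _ (fun h => hj h.symm), pv_getD_replicate]
      have hng : ¬ (j % 2 = 1 ∧ (j:Int) < 3) := by rintro ⟨h1, h2⟩; omega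
      rw [if_neg hng]
      split_ifs <;> rfl
  | succ k ih =>
    intro hk
    have hkk : 3 + (k:Int) ≤ 2*n + 1 := by push_cast at hk ⊢; omega
    obtain ⟨ihlen, ihget⟩ := ih hkk
    have hsplit : PySem.List.pyRange 3 (3 + ((k+1:Nat):Int)) 1
        = PySem.List.pyRange 3 (3 + (k:Int)) 1 ++ [3 + (k:Int)] := by
      rw [show (3:Int) + ((k+1:Nat):Int) = (3 + (k:Int)) + 1 by push_cast; ring]
      exact PySem.List.pyRange_one_succ_right (by omega)
    rw [hsplit, List.foldl_append]
    simp only [List.foldl_cons, List.foldl_nil]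
    set L := (PySem.List.pyRange 3 (3 + (k:Int)) 1).foldl
          (fun f i => f.set i.toNat (PySem.Int.mod (f.getD (i - 2).toNat 0 * i) pvMod))
          ((List.replicate (2 * n + 5).toNat 0).set 1 1) with hL
    have htn : ((3:Int) + (k:Int)).toNat = 3 + k := by omega
    have htn2 : ((3:Int) + (k:Int) - 2).toNat = k + 1 := by omega
    have hlen2 : 3 + k < L.length := by rw [ihlen]; omega
    have hget1 : L.getD (k+1) 0 = if (k+1) % 2 = 1 then ddf (k+1) else 0 := by
      rw [ihget (k+1)]
      by_cases hp : (k+1) % 2 = 1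
      · rw [if_pos ⟨hp, by push_cast; omega⟩, if_pos hp]
      · rw [if_neg (by rintro ⟨h1, _⟩; exact hp h1), if_neg hp]
    refine ⟨by simp [List.length_set, ihlen], ?_⟩
    intro j
    by_cases hj : j = 3 + k
    · subst hj
      rw [htn, htn2, pv_getD_set_self _ _ _ hlen2, hget1]
      by_cases hp : (k+1) % 2 = 1
      · rw [if_pos hp, if_pos ⟨by omega, by push_cast; omega⟩]
        rw [show 3 + k = k + 3 by ring, ddf_step,
          show (3:Int) + (k:Int) = (k:Int) + 3 by ring]
      · rw [if_neg hp, if_neg (by rintro ⟨h1, _⟩; omega)]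
        rw [zero_mul, pv_mod_zero]
    · rw [htn, htn2, pv_getD_set_ne _ _ _ _ (fun h => hj h.symm), ihget j]
      have hiff : ((j:Int) < 3 + (k:Int)) ↔ ((j:Int) < 3 + ((k+1:Nat):Int)) := by
        push_cast; omega
      simp only [hiff]

theorem pv_tableB (n : Int) (hn : 1 ≤ n) :
    ∀ (k : Nat), 2 + (k:Int) ≤ n + 1 →
      ∀ j : Nat,
        ((PySem.List.pyRange 2 (2 + (k:Int)) 1).foldl
          (fun g kk => g.set kk.toNat (PySem.Int.mod (g.getD (kk - 1).toNat 0 * (2 * kk - 1)) pvMod))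
          (List.replicate (n + 1).toNat 1)).getD j 0
          = if (j:Int) < n + 1 then (if 1 ≤ j ∧ (j:Int) < 2 + (k:Int) then ddf (2*j-1) else 1) else 0 := by
  intro k
  induction k with
  | zero =>
    intro _
    rw [show (2:Int) + ((0:Nat):Int) = 2 by norm_num, PySem.List.pyRange_one_eq_nil (le_refl 2)]
    simp only [List.foldl_nil]
    intro j
    rw [pv_getD_replicate]
    by_cases hlt : (j:Int) < n + 1
    · rw [if_pos (by omega), if_pos hlt]
      by_cases h1 : 1 ≤ j ∧ (j:Int) < 2
      · have : j = 1 := by omega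
        subst this
        norm_num [ddf]
      · rw [if_neg h1]
    · rw [if_neg (by omega), if_neg hlt]
  | succ k ih =>
    intro hk
    have hkk : 2 + (k:Int) ≤ n + 1 := by push_cast at hk ⊢; omega
    have ihget := ih hkk
    have hsplit : PySem.List.pyRange 2 (2 + ((k+1:Nat):Int)) 1
        = PySem.List.pyRange 2 (2 + (k:Int)) 1 ++ [2 + (k:Int)] := by
      rw [show (2:Int) + ((k+1:Nat):Int) = (2 + (k:Int)) + 1 by push_cast; ring]
      exact PySem.List.pyRange_one_succ_right (by omega)
    rw [hsplit, List.foldl_append]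
    simp only [List.foldl_cons, List.foldl_nil]
    set G := (PySem.List.pyRange 2 (2 + (k:Int)) 1).foldl
          (fun g kk => g.set kk.toNat (PySem.Int.mod (g.getD (kk - 1).toNat 0 * (2 * kk - 1)) pvMod))
          (List.replicate (n + 1).toNat 1) with hG
    have hGlen : G.length = (n + 1).toNat := by
      rw [hG, pv_len_fold]
      exact List.length_replicate
    have htn : ((2:Int) + (k:Int)).toNat = 2 + k := by omega
    have htn2 : ((2:Int) + (k:Int) - 1).toNat = k + 1 := by omega
    have hlen2 : 2 + k < G.length := by rw [hGlen]; push_cast at hk; omega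
    have hget1 : G.getD (k+1) 0 = ddf (2*(k+1)-1) := by
      rw [ihget (k+1)]
      rw [if_pos (by push_cast at hk ⊢; omega), if_pos ⟨by omega, by push_cast; omega⟩]
    intro j
    by_cases hj : j = 2 + k
    · subst hj
      rw [htn, htn2, pv_getD_set_self _ _ _ hlen2, hget1]
      rw [if_pos (by push_cast at hk ⊢; omega), if_pos ⟨by omega, by push_cast; omega⟩]
      rw [show 2*(k+1)-1 = 2*k+1 by omega, show 2*(2+k)-1 = 2*k+3 by omega, ddf_step]
      congr 1
      push_cast; ring
    · rw [htn, htn2, pv_getD_set_ne _ _ _ _ (fun h => hj h.symm), ihget j]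
      have hiff : ((j:Int) < 2 + (k:Int)) ↔ ((j:Int) < 2 + ((k+1:Nat):Int)) := by
        push_cast; omega
      simp only [hiff]

theorem pv_reindex (t : Int → Int) :
    ∀ (c : Nat), (∀ i : Int, i % 2 = 0 → 2 ≤ i → i ≤ 2*(c:Int) → t i = 0) →
      ((PySem.List.pyRange 2 (2*(c:Int)+1) 1).map t).sum
        = ((PySem.List.pyRange 1 (c:Int) 1).map (fun k => t (2*k+1))).sum := by
  intro c
  induction c with
  | zero =>
    intro _
    rw [show 2*(((0:Nat)):Int)+1 = 1 by norm_num,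
      PySem.List.pyRange_one_eq_nil (show (1:Int) ≤ 2 by norm_num),
      show (((0:Nat)):Int) = 0 by norm_num,
      PySem.List.pyRange_one_eq_nil (show (0:Int) ≤ 1 by norm_num)]
    rfl
  | succ c ihc =>
    intro h0
    by_cases hc : c = 0
    · subst hc
      rw [show 2*(((0+1:Nat)):Int)+1 = 2+1 by norm_num,
        PySem.List.pyRange_one_cons (show (2:Int) < 2+1 by norm_num),
        PySem.List.pyRange_one_eq_nil (le_refl (2+1 : Int)),
        show (((0+1:Nat)):Int) = 1 by norm_num,
        PySem.List.pyRange_one_eq_nil (le_refl (1:Int))]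
      simp only [List.map_cons, List.map_nil, List.sum_cons, List.sum_nil, add_zero]
      exact h0 2 (by norm_num) (le_refl 2) (by norm_num)
    · have h0' : ∀ i : Int, i % 2 = 0 → 2 ≤ i → i ≤ 2*(c:Int) → t i = 0 := by
        intro i ha hb hcc
        exact h0 i ha hb (by push_cast; omega)
      rw [show 2*(((c+1:Nat)):Int)+1 = (2*(c:Int)+1+1)+1 by push_cast; ring,
        PySem.List.pyRange_one_succ_right (show (2:Int) ≤ 2*(c:Int)+1+1 by omega),
        show 2*(c:Int)+1+1 = (2*(c:Int)+1)+1 by ring,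
        PySem.List.pyRange_one_succ_right (show (2:Int) ≤ 2*(c:Int)+1 by omega),
        show (((c+1:Nat)):Int) = (c:Int)+1 by push_cast; ring,
        PySem.List.pyRange_one_succ_right (show (1:Int) ≤ (c:Int) by omega)]
      simp only [List.map_append, List.sum_append, List.map_cons, List.map_nil,
        List.sum_cons, List.sum_nil, add_zero]
      rw [ihc h0']
      have he : t (2*(c:Int)+1+1) = 0 :=
        h0 (2*(c:Int)+1+1) (by omega) (by omega) (by push_cast; omega)
      rw [he]
      ring

theorem calculate_ans_eq (n : Int) (s : List Int) (_hpre : Pre_calculate_ans n s) :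
    calculate_ans n s = calculate_ans_alt n s := by
  by_cases hn : n < 1
  · have hnil : PySem.List.pyRange 2 (2*n+1) 1 = [] :=
      PySem.List.pyRange_one_eq_nil (by omega)
    unfold calculate_ans calculate_ans_alt
    rw [if_pos hn]
    rw [show (2*n+1 : Int) = 2*n+1 from rfl] at hnil
    simp [hnil]
  · replace hn : 1 ≤ n := by omega
    -- characterize A's table
    obtain ⟨_, hfget⟩ := pv_tableA n hn (2*n-2).toNat (by omega)
    have hfget' : ∀ j : Nat, (pvBuildF n).getD j 0
        = if j % 2 = 1 ∧ (j:Int) < 2*n+1 then ddf j else 0 := by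
      intro j
      have h3 : (3:Int) + (((2*n-2).toNat : Nat):Int) = 2*n+1 := by omega
      rw [h3] at hfget
      exact hfget j
    -- characterize B's table
    set G := (PySem.List.pyRange 2 (n + 1) 1).foldl
      (fun g k => g.set k.toNat (PySem.Int.mod (g.getD (k - 1).toNat 0 * (2 * k - 1)) pvMod))
      (List.replicate (n + 1).toNat 1) with hGdef
    have hgget : ∀ j : Nat, G.getD j 0
        = if (j:Int) < n+1 then (if 1 ≤ j ∧ (j:Int) < n+1 then ddf (2*j-1) else 1) else 0 := by
      intro j
      have h2 : (2:Int) + (((n-1).toNat : Nat):Int) = n+1 := by omega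
      have hb := pv_tableB n hn (n-1).toNat (by omega) j
      rw [h2] at hb
      rw [hGdef]
      exact hb
    set gs : Int → Int := fun j => s.getD j.toNat 0 with hgs
    set F := (pvBuildF n).getD (2*n-1).toNat 0 with hFdef
    set pfn : Int → Int :=
      fun i => (pvBuildF n).getD (i-2).toNat 0 * (pvBuildF n).getD (2*n-i).toNat 0 with hp
    set dfn : Int → Int := fun i => gs (i-1) - gs (i-2) with hd
    set uB : Int → Int := fun k =>
      PySem.Int.mod (G.getD k.toNat 0 * G.getD (n-k).toNat 0) pvMod *
        (s.getD (2*k).toNat 0 - s.getD (2*k-1).toNat 0) with hu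
    -- A as a reduced sum
    have hA : calculate_ans n s
        = (0 + ((PySem.List.pyRange 2 (2*n+1) 1).map
            (fun i => (PySem.Int.mod (F + pvMod - PySem.Int.mod (pfn i) pvMod) pvMod) * dfn i)).sum) % pvMod := by
      unfold calculate_ans
      exact pv_fold_mod
        (fun i => (PySem.Int.mod (F + pvMod - PySem.Int.mod (pfn i) pvMod) pvMod) * dfn i)
        (PySem.List.pyRange 2 (2*n+1) 1) 0 (by norm_num)
    have hcombo := pv_combo F pfn dfn (PySem.List.pyRange 2 (2*n+1) 1)
    -- telescoping of the differences
    have htel : ((PySem.List.pyRange 2 (2*n+1) 1).map dfn).sum = gs (2*n-1) - gs 0 := by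
      have hk : (2*n+1) = 2 + (((2*n-2).toNat : Int) + 1) := by omega
      have hdh : dfn = fun i => (fun j => gs (j-1)) i - (fun j => gs (j-1)) (i-1) := by
        funext i
        simp only [hd]
        congr 2
        omega
      rw [hk, hdh, pv_telescope (fun j => gs (j-1)) (2*n-2).toNat 2]
      have h1 : (2 : Int) + ((2*n-2).toNat : Int) - 1 = 2*n-1 := by omega
      have h2 : (2 : Int) - 1 - 1 = 0 := by omega
      rw [h1, h2]
    -- even terms of A's residual sum vanish
    have hzero : ∀ i : Int, i % 2 = 0 → 2 ≤ i → i ≤ 2*((n.toNat:Nat):Int) →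
        (fun i => PySem.Int.mod (pfn i) pvMod * dfn i) i = 0 := by
      intro i he h2 hub
      have hpf : pfn i = 0 := by
        simp only [hp]
        have hz : (pvBuildF n).getD (i-2).toNat 0 = 0 := by
          rw [hfget', if_neg]
          rintro ⟨hodd, _⟩
          omega
        rw [hz, zero_mul]
      simp only [hpf, pv_mod_zero, zero_mul]
    have hreidx := pv_reindex (fun i => PySem.Int.mod (pfn i) pvMod * dfn i) n.toNat hzero
    rw [show 2*((n.toNat:Nat):Int)+1 = 2*n+1 by omega,
      show ((n.toNat:Nat):Int) = n by omega] at hreidx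
    -- odd terms of A's residual sum are exactly B's convolution terms
    have hterm : ((PySem.List.pyRange 1 n 1).map
          (fun k => PySem.Int.mod (pfn (2*k+1)) pvMod * dfn (2*k+1))).sum
        = ((PySem.List.pyRange 1 n 1).map uB).sum := by
      congr 1
      apply List.map_congr_left
      intro k hkmem
      rw [PySem.List.mem_pyRange_one] at hkmem
      obtain ⟨hk1, hk2⟩ := hkmem
      have e1 : (pvBuildF n).getD ((2*k-1 : Int)).toNat 0 = ddf ((2*k-1 : Int)).toNat := by
        rw [hfget', if_pos ⟨by omega, by omega⟩]
      have e2 : (pvBuildF n).getD ((2*n-2*k-1 : Int)).toNat 0 = ddf ((2*n-2*k-1 : Int)).toNat := by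
        rw [hfget', if_pos ⟨by omega, by omega⟩]
      have e3 : G.getD k.toNat 0 = ddf ((2*k-1 : Int)).toNat := by
        rw [hgget, if_pos (by omega), if_pos ⟨by omega, by omega⟩]
        congr 1
        omega
      have e4 : G.getD (n-k).toNat 0 = ddf ((2*n-2*k-1 : Int)).toNat := by
        rw [hgget, if_pos (by omega), if_pos ⟨by omega, by omega⟩]
        congr 1
        omega
      simp only [hp, hd, hgs, hu]
      rw [show (2*k+1-2 : Int) = 2*k-1 by ring,
        show (2*n-(2*k+1) : Int) = 2*n-2*k-1 by ring,
        show (2*k+1-1 : Int) = 2*k by ring,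
        e1, e2, e3, e4]
    -- B as a reduced sum
    have hn' : ¬ n < 1 := by omega
    set total0 := PySem.Int.mod
      (G.getD n.toNat 0 * PySem.Int.mod (s.getD (2*n-1).toNat 0 - s.getD 0 0) pvMod) pvMod with ht0
    have hB0 : calculate_ans_alt n s
        = (PySem.List.pyRange 1 n 1).foldl
            (fun total k => PySem.Int.mod (total - uB k) pvMod) total0 := by
      unfold calculate_ans_alt
      rw [if_neg hn']
    have hfun : (fun (total k : Int) => PySem.Int.mod (total - uB k) pvMod)
        = (fun (x k : Int) => PySem.Int.mod (x + (-(uB k))) pvMod) := by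
      funext x k
      rw [sub_eq_add_neg]
    have hB : calculate_ans_alt n s
        = (total0 + ((PySem.List.pyRange 1 n 1).map (fun k => -(uB k))).sum) % pvMod := by
      rw [hB0, hfun]
      exact pv_fold_mod (fun k => -(uB k)) (PySem.List.pyRange 1 n 1) total0
        (by rw [ht0]; exact pv_mod_idem _)
    rw [pv_sum_neg] at hB
    -- identify the head factors
    have hFval : F = ddf ((2*n-1 : Int)).toNat := by
      rw [hFdef, hfget', if_pos ⟨by omega, by omega⟩]
    have hGn : G.getD n.toNat 0 = ddf ((2*n-1 : Int)).toNat := by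
      rw [hgget, if_pos (by omega), if_pos ⟨by omega, by omega⟩]
      congr 1
      omega
    -- B in closed emod form
    have hSfin : calculate_ans_alt n s
        = ((F * ((gs (2*n-1) - gs 0) % pvMod)) % pvMod
            - ((PySem.List.pyRange 1 n 1).map uB).sum) % pvMod := by
      rw [hB, ht0, hGn, ← hFval, PySem.Int.mod_eq_emod_of_pos pvMod_pos,
        PySem.Int.mod_eq_emod_of_pos pvMod_pos]
      have hgg : gs (2*n-1) - gs 0 = s.getD (2*n-1).toNat 0 - s.getD 0 0 := by
        simp only [hgs]
        norm_num
      rw [hgg]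
      ring_nf
    rw [hA, zero_add, hcombo, htel, hreidx, hterm, hSfin, pv_final2]

-- ===== VERDICT (by name: the statement is the Claim_ definition above) =====
theorem calculate_ans_spec : Claim_equal_calculate_ans := by
  intro n s _ hpre
  unfold Spec_calculate_ans
  exact calculate_ans_eq n s hpre
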